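-- pv_equiv track=rewrite | github.com/dstiefe/medsyncai_agentic_backend | app/agents/clinical/ais_clinical_engine/agents/_archive_qa_v2/section_router.py | _sections_overlap
-- ===== SOURCE A (Python) =====
-- def _sections_overlap(secs_a: set, secs_b: set) -> bool:
--     """Check if two section sets overlap (exact, parent-child, or sibling under 2+ level parent)."""
--     for sa in secs_a:
--         for sb in secs_b:
--             if sa == sb:
--                 return True
--             # Parent-child: 4.6 is parent of 4.6.2
--             if sa.startswith(sb + ".") or sb.startswith(sa + "."):
--                 return True
--             # Siblings under a 2+ level parent: 4.7.2 and 4.7.3 share 4.7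
--             parts_a = sa.split(".")
--             parts_b = sb.split(".")
--             if len(parts_a) >= 2 and len(parts_b) >= 2:
--                 if parts_a[:2] == parts_b[:2]:
--                     return True
--     return False
-- ===== SOURCE B (Python) =====
-- def _sections_overlap(secs_a: set, secs_b: set) -> bool:
--     """Check if two section sets overlap (exact, parent-child, or sibling under 2+ level parent).
--
--     Hash-indexed: one pass over secs_b builds lookup sets, one pass over secs_a queries them.
--     """
--     exact_b = set(secs_b)
--     # sb itself, plus every prefix of sb that ends right before a '.', i.e. the
--     # strings x with sb == x or sb.startswith(x + ".")
--     anc_b = {sb[:i] for sb in secs_b for i, ch in enumerate(sb) if ch == "."} | exact_b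
--     pairs_b = {(p[0], p[1]) for p in (sb.split(".") for sb in secs_b) if len(p) >= 2}
--     for sa in secs_a:
--         if sa in anc_b:
--             return True
--         if any(ch == "." and sa[:i] in exact_b for i, ch in enumerate(sa)):
--             return True
--         parts = sa.split(".")
--         if len(parts) >= 2 and (parts[0], parts[1]) in pairs_b:
--             return True
--     return False
-- ===== Notes on version B (the rewrite author's own statement) =====
-- stated objective: alternative
-- what changed: Replaces A's nested scan over all (sa, sb) pairs with hash-set indexes built in one pass over secs_b (exact strings, all dotted prefixes, first-two split components), then a single pass over secs_a querying them.
import Mathlib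
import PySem

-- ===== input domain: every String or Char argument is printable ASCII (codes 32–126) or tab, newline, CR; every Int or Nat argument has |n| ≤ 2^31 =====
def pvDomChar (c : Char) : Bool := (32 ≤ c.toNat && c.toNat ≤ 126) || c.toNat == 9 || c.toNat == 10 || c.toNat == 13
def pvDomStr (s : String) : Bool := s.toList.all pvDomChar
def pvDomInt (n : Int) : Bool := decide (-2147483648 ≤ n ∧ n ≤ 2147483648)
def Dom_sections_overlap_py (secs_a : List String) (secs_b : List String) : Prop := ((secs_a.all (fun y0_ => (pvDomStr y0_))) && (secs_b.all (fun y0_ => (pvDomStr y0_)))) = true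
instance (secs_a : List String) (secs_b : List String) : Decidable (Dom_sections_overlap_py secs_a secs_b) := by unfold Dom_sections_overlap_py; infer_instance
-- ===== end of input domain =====

-- ===== PORT A =====
-- B replaces A's nested pairwise scan with hash-set indexes built once over secs_b, then one pass over secs_a (objective: alternative algorithm; same return value everywhere).
-- shared helper: Python's s.split(".")  (separator "." is never empty, so split? is always `some`)
def pvSplit (s : String) : List String := (PySem.Str.split? s ".").getD []

def pvTestA (sa sb : String) : Bool :=
  if sa == sb then true
  else if PySem.Str.startswith sa (sb ++ ".") || PySem.Str.startswith sb (sa ++ ".") then true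
  else if 2 ≤ (pvSplit sa).length && 2 ≤ (pvSplit sb).length then
    PySem.List.slice (pvSplit sa) none (some 2) == PySem.List.slice (pvSplit sb) none (some 2)
  else false

def sections_overlap_py (secs_a : List String) (secs_b : List String) : Bool :=
  secs_a.any (fun sa => secs_b.any (fun sb => pvTestA sa sb))

-- ===== PORT B =====
-- {sb[:i] for i, ch in enumerate(sb) if ch == "."}  (inner part of the anc_b comprehension)
def pvDotCuts (sb : String) : List String :=
  ((PySem.List.enumerate sb.toList).filter (fun p => p.2 == '.')).map
    (fun p => PySem.Str.slice sb none (some p.1))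

def sections_overlap_py_alt (secs_a : List String) (secs_b : List String) : Bool :=
  let exact_b : PySem.Set String := PySem.Set.ofList secs_b
  let anc_b : PySem.Set String :=
    PySem.Set.union (PySem.Set.ofList (secs_b.flatMap pvDotCuts)) exact_b
  let pairs_b : PySem.Set (String × String) :=
    PySem.Set.ofList
      (((secs_b.map (fun sb => pvSplit sb)).filter (fun p => 2 ≤ p.length)).map
        (fun p => (PySem.List.pyGetD p 0 "", PySem.List.pyGetD p 1 "")))
  secs_a.any (fun sa =>
    PySem.Set.contains anc_b sa ||
    (PySem.List.enumerate sa.toList).any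
      (fun p => p.2 == '.' && PySem.Set.contains exact_b (PySem.Str.slice sa none (some p.1))) ||
    (decide (2 ≤ (pvSplit sa).length) &&
       PySem.Set.contains pairs_b (PySem.List.pyGetD (pvSplit sa) 0 "", PySem.List.pyGetD (pvSplit sa) 1 "")))

-- ===== PRECONDITION & SPEC =====
def Spec_sections_overlap_py (secs_a : List String) (secs_b : List String) (out : Bool) : Prop := out = sections_overlap_py_alt secs_a secs_b
instance (secs_a : List String) (secs_b : List String) (out : Bool) : Decidable (Spec_sections_overlap_py secs_a secs_b out) := by unfold Spec_sections_overlap_py; infer_instance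

-- ===== CLAIM (what is proved, stated in full; the proofs are below) =====
def Claim_equal_sections_overlap_py : Prop := ∀ (secs_a : List String) (secs_b : List String), Dom_sections_overlap_py secs_a secs_b → Spec_sections_overlap_py secs_a secs_b (sections_overlap_py secs_a secs_b)

-- ===== LEMMAS AND PROOFS =====

-- the overlap relation both programs decide, stated on the raw strings
def pvRel (sa sb : String) : Prop :=
  sa = sb ∨ (sb.toList ++ ['.']) <+: sa.toList ∨ (sa.toList ++ ['.']) <+: sb.toList ∨
  (2 ≤ (pvSplit sa).length ∧ 2 ≤ (pvSplit sb).length ∧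
    (pvSplit sa).take 2 = (pvSplit sb).take 2)

theorem pvMemEnum (p : Int × Char) (cs : List Char) (s : Int) :
    p ∈ PySem.List.enumerate cs s ↔ ∃ k : Nat, ∃ h : k < cs.length, p = (s + k, cs[k]) := by
  induction cs generalizing s with
  | nil => simp [PySem.List.enumerate_nil]
  | cons c t ih =>
    simp only [PySem.List.enumerate_cons, List.mem_cons, ih]
    constructor
    · rintro (rfl | ⟨k, hk, rfl⟩)
      · exact ⟨0, by simp, by simp⟩
      · exact ⟨k+1, by simpa using hk, by simp; ring⟩
    · rintro ⟨k, hk, rfl⟩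
      cases k with
      | zero => left; simp
      | succ k => right; exact ⟨k, by simpa using hk, by simp; ring⟩

theorem pvPrefixDot (la lb : List Char) :
    (la ++ ['.']) <+: lb ↔ ∃ k : Nat, ∃ h : k < lb.length, lb[k] = '.' ∧ la = lb.take k := by
  constructor
  · intro h
    have hl : la.length + 1 ≤ lb.length := by
      have := h.length_le; simpa using this
    have he : la ++ ['.'] = lb.take (la.length + 1) := by
      have := List.prefix_iff_eq_take.mp h; simpa using this
    refine ⟨la.length, by omega, ?_, ?_⟩
    · have h1 : (la ++ ['.'])[la.length]? = some '.' := by simp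
      rw [he] at h1
      simp only [List.getElem?_take, List.getElem?_eq_getElem (show la.length < lb.length by omega)] at h1
      simpa using h1
    · have : (la ++ ['.']).take la.length = (lb.take (la.length + 1)).take la.length := by rw [he]
      simpa [List.take_take] using this
  · rintro ⟨k, hk, hdot, rfl⟩
    have : lb.take k ++ ['.'] = lb.take (k+1) := by
      rw [List.take_add_one]; simp [List.getElem?_eq_getElem hk, hdot]
    rw [this]; exact List.take_prefix _ _

-- a string is one of the dotted cuts of sb iff (it ++ ".") is a prefix of sb
theorem pvMemDotCuts (x sb : String) :
    x ∈ pvDotCuts sb ↔ (x.toList ++ ['.']) <+: sb.toList := by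
  rw [pvPrefixDot]
  simp only [pvDotCuts, List.mem_map, List.mem_filter, beq_iff_eq]
  constructor
  · rintro ⟨p, ⟨hmem, hdot⟩, rfl⟩
    rcases (pvMemEnum p sb.toList 0).mp hmem with ⟨k, hk, rfl⟩
    refine ⟨k, hk, by simpa using hdot, ?_⟩
    simp [pysem, PySem.List.slice_to_natCast]
  · rintro ⟨k, hk, hdot, hx⟩
    refine ⟨((k : Int), sb.toList[k]), ⟨(pvMemEnum _ _ 0).mpr ⟨k, hk, by simp⟩, by simpa using hdot⟩, ?_⟩
    apply String.toList_inj.mp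
    simp [pysem, PySem.List.slice_to_natCast, hx]

theorem pvTake2 : ∀ (xs : List String), 2 ≤ xs.length → xs.take 2 = [xs.getD 0 "", xs.getD 1 ""]
  | _ :: _ :: _, _ => by simp

theorem pvStartswithDot (u v : String) :
    PySem.Str.startswith u (v ++ ".") = true ↔ (v.toList ++ ['.']) <+: u.toList := by
  rw [PySem.Str.startswith_eq, PySem.Chars.startswith_iff, String.toList_append]
  rfl

theorem pvTestA_iff (sa sb : String) : pvTestA sa sb = true ↔ pvRel sa sb := by
  unfold pvTestA pvRel
  split_ifs with h1 h2 h3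
  · simp only [true_iff]; exact Or.inl (by simpa using h1)
  · simp only [true_iff]
    rcases Bool.or_eq_true _ _ |>.mp h2 with h | h
    · exact Or.inr (Or.inl ((pvStartswithDot sa sb).mp h))
    · exact Or.inr (Or.inr (Or.inl ((pvStartswithDot sb sa).mp h)))
  · have hsl : ∀ xs : List String, PySem.List.slice xs none (some 2) = xs.take 2 := by
      intro xs; simp [pysem]
    rw [hsl, hsl]
    simp only [Bool.and_eq_true, decide_eq_true_eq] at h3
    simp only [beq_iff_eq]
    constructor
    · intro ht; exact Or.inr (Or.inr (Or.inr ⟨h3.1, h3.2, ht⟩))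
    · rintro (rfl | hp | hp | ⟨_, _, ht⟩)
      · simp at h1
      · exact absurd (Bool.or_eq_true _ _ |>.mpr (Or.inl ((pvStartswithDot sa sb).mpr hp))) h2
      · exact absurd (Bool.or_eq_true _ _ |>.mpr (Or.inr ((pvStartswithDot sb sa).mpr hp))) h2
      · exact ht
  · simp only [false_iff]
    rintro (rfl | hp | hp | ⟨ha, hb, ht⟩)
    · simp at h1
    · exact h2 (Bool.or_eq_true _ _ |>.mpr (Or.inl ((pvStartswithDot sa sb).mpr hp)))
    · exact h2 (Bool.or_eq_true _ _ |>.mpr (Or.inr ((pvStartswithDot sb sa).mpr hp)))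
    · exact h3 (by simp [ha, hb])

theorem pvTestB_iff (sa : String) (secs_b : List String) :
    (PySem.Set.contains (PySem.Set.union (PySem.Set.ofList (secs_b.flatMap pvDotCuts)) (PySem.Set.ofList secs_b)) sa ||
     (PySem.List.enumerate sa.toList).any
       (fun p => p.2 == '.' && PySem.Set.contains (PySem.Set.ofList secs_b) (PySem.Str.slice sa none (some p.1))) ||
     (decide (2 ≤ (pvSplit sa).length) &&
       PySem.Set.contains (PySem.Set.ofList
         (((secs_b.map (fun sb => pvSplit sb)).filter (fun p => 2 ≤ p.length)).map
           (fun p => (PySem.List.pyGetD p 0 "", PySem.List.pyGetD p 1 ""))))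
         (PySem.List.pyGetD (pvSplit sa) 0 "", PySem.List.pyGetD (pvSplit sa) 1 ""))) = true
    ↔ ∃ sb ∈ secs_b, pvRel sa sb := by
  simp only [Bool.or_eq_true, Bool.and_eq_true, decide_eq_true_eq, List.any_eq_true,
    PySem.Set.contains_iff, PySem.Set.mem_union, PySem.Set.mem_ofList, List.mem_flatMap,
    List.mem_map, List.mem_filter, beq_iff_eq]
  constructor
  · rintro ((((⟨sb, hsb, hcut⟩ | hsa) | ⟨p, hp, hdot, hsl⟩) | ⟨h2a, pb, ⟨⟨sb, hsb, rfl⟩, h2b⟩, hpair⟩))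
    · exact ⟨sb, hsb, Or.inr (Or.inr (Or.inl ((pvMemDotCuts sa sb).mp hcut)))⟩
    · exact ⟨sa, hsa, Or.inl rfl⟩
    · rcases (pvMemEnum p sa.toList 0).mp hp with ⟨k, hk, rfl⟩
      simp only at hdot hsl
      refine ⟨_, hsl, Or.inr (Or.inl ?_)⟩
      rw [pvPrefixDot]
      exact ⟨k, hk, by simpa using hdot, by simp [pysem, PySem.List.slice_to_natCast]⟩
    · refine ⟨sb, hsb, Or.inr (Or.inr (Or.inr ⟨h2a, h2b, ?_⟩))⟩
      rw [pvTake2 _ h2a, pvTake2 _ h2b]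
      have h0 := congrArg Prod.fst hpair
      have h1 := congrArg Prod.snd hpair
      simp only [PySem.List.pyGetD_zero] at h0 h1
      rw [show ((1:Int)) = ((1:Nat):Int) by norm_num, PySem.List.pyGetD_natCast,
        PySem.List.pyGetD_natCast] at h1
      rw [← h0, ← h1]
  · rintro ⟨sb, hsb, (rfl | hp | hp | ⟨h2a, h2b, ht⟩)⟩
    · exact Or.inl (Or.inl (Or.inr hsb))
    · left; right
      rcases (pvPrefixDot sb.toList sa.toList).mp hp with ⟨k, hk, hdot, hcut⟩
      refine ⟨((k:Int), sa.toList[k]), (pvMemEnum _ _ 0).mpr ⟨k, hk, by simp⟩, by simpa using hdot, ?_⟩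
      have hts : (PySem.Str.slice sa none (some ((k:Nat):Int))).toList = sa.toList.take k := by
        simp [pysem, PySem.List.slice_to_natCast]
      have heq : PySem.Str.slice sa none (some ((k:Nat):Int)) = sb :=
        String.toList_inj.mp (by rw [hts, ← hcut])
      simpa [heq] using hsb
    · exact Or.inl (Or.inl (Or.inl ⟨sb, hsb, (pvMemDotCuts sa sb).mpr hp⟩))
    · right
      refine ⟨h2a, pvSplit sb, ⟨⟨sb, hsb, rfl⟩, h2b⟩, ?_⟩
      have h := ht
      rw [pvTake2 _ h2a, pvTake2 _ h2b] at h
      simp only [List.cons.injEq, and_true] at h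
      simp only [PySem.List.pyGetD_zero]
      rw [show ((1:Int)) = ((1:Nat):Int) by norm_num, PySem.List.pyGetD_natCast,
        PySem.List.pyGetD_natCast]
      rw [← h.1, ← h.2]

-- ===== VERDICT (by name: the statement is the Claim_ definition above) =====
theorem sections_overlap_py_spec : Claim_equal_sections_overlap_py := by
  intro secs_a secs_b _
  simp only [Spec_sections_overlap_py, sections_overlap_py, sections_overlap_py_alt]
  apply Bool.coe_iff_coe.mp
  simp only [List.any_eq_true]
  constructor
  · rintro ⟨sa, hsa, sb, hsb, ht⟩
    exact ⟨sa, hsa, (pvTestB_iff sa secs_b).mpr ⟨sb, hsb, (pvTestA_iff sa sb).mp ht⟩⟩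
  · rintro ⟨sa, hsa, hin⟩
    rcases (pvTestB_iff sa secs_b).mp hin with ⟨sb, hsb, hr⟩
    exact ⟨sa, hsa, sb, hsb, (pvTestA_iff sa sb).mpr hr⟩
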